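-- pv_equiv track=rewrite | github.com/Boijok/AdventOfCode | src/year_2021/day_4/second_challenge.py | check_grid_col
-- ===== SOURCE A (Python) =====
-- from typing import List
--
-- def check_grid_col(grid: List[List[int]]) -> bool:
--     grid_col_a_bingo = False
--     for col_index in range(0, len(grid[0])):
--         partial_sum = 0
--         for row in grid:
--             partial_sum = partial_sum + row[col_index]
--         if partial_sum == -5:
--             grid_col_a_bingo = True
--     return grid_col_a_bingo
-- ===== SOURCE B (Python) =====
-- from typing import List
--
-- def check_grid_col(grid: List[List[int]]) -> bool:
--     n = len(grid[0])
--     col_sums = [0] * n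
--     for row in grid:
--         col_sums = [col_sums[c] + row[c] for c in range(n)]
--     return any(s == -5 for s in col_sums)
-- ===== Notes on version B (the rewrite author's own statement) =====
-- stated objective: alternative
-- what changed: Column-major nested re-scan (one pass over all rows per column) replaced by a single row-major pass that maintains a table of partial column sums, then a final any() over the table.
import Mathlib
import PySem

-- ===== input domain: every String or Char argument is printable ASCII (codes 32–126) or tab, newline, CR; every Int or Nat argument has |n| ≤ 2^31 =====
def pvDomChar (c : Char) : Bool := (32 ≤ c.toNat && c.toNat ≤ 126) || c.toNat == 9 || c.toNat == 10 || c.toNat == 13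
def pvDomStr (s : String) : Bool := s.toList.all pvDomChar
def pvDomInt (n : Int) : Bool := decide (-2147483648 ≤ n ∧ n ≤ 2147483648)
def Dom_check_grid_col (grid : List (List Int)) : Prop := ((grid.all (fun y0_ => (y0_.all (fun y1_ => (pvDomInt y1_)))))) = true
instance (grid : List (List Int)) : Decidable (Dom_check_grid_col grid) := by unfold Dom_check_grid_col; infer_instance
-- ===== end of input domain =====

-- B replaces A's column-major nested re-scan by a single row-major pass over a
-- partial-column-sum table (alternative decomposition, same cost).

-- ===== PORT A =====
def check_grid_col (grid : List (List Int)) : Bool :=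
  match PySem.List.pyGet? grid 0 with
  | none => false  -- grid[0] raises IndexError on empty grid (excluded by Pre_)
  | some r0 =>
    (PySem.List.pyRange 0 (PySem.List.len r0) 1).foldl
      (fun bingo ci =>
        let ps := grid.foldl (fun s row => s + PySem.List.pyGetD row ci 0) 0
        if ps = -5 then true else bingo) false

-- ===== PORT B =====
def check_grid_col_alt (grid : List (List Int)) : Bool :=
  match PySem.List.pyGet? grid 0 with
  | none => false  -- len(grid[0]) raises IndexError on empty grid (excluded by Pre_)
  | some r0 =>
    let n := PySem.List.len r0
    let sums := grid.foldl
      (fun cs row =>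
        (PySem.List.pyRange 0 n 1).map
          (fun c => PySem.List.pyGetD cs c 0 + PySem.List.pyGetD row c 0))
      (List.replicate n.toNat 0)
    sums.any (fun s => s == -5)

-- ===== PRECONDITION & SPEC =====
-- Pre_ excludes exactly the inputs where Python A raises IndexError: the empty
-- grid (grid[0]) and ragged grids with some row shorter than the first row
-- (row[col_index] out of range).
def Pre_check_grid_col (grid : List (List Int)) : Prop :=
  grid ≠ [] ∧ ∀ row ∈ grid, grid.headI.length ≤ row.length
instance (grid : List (List Int)) : Decidable (Pre_check_grid_col grid) := by
  unfold Pre_check_grid_col; infer_instance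
def pvWitness_check_grid_col : List (List Int) := [[-5, 2], [0, 3]]

def Spec_check_grid_col (grid : List (List Int)) (out : Bool) : Prop := out = check_grid_col_alt grid
instance (grid : List (List Int)) (out : Bool) : Decidable (Spec_check_grid_col grid out) := by unfold Spec_check_grid_col; infer_instance

-- ===== CLAIM (what is proved, stated in full; the proofs are below) =====
def Claim_equal_check_grid_col : Prop := ∀ (grid : List (List Int)), Dom_check_grid_col grid → Pre_check_grid_col grid → Spec_check_grid_col grid (check_grid_col grid)

-- ===== LEMMAS AND PROOFS =====

-- range(0, n) for a Nat-valued bound, as a mapped List.range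
theorem pyRange_len (n : Nat) :
    PySem.List.pyRange 0 (n : Int) 1 = (List.range n).map (fun (k : Nat) => (k : Int)) := by
  rw [PySem.List.pyRange_one]
  simp [List.map_eq_flatMap]

-- congruence from a pyRange-indexed map to a List.range-indexed map
theorem map_pyRange_cong (n : Nat) (g : Int → Int) (h : Nat → Int)
    (hg : ∀ k, k < n → g (k : Int) = h k) :
    (PySem.List.pyRange 0 (n : Int) 1).map g = (List.range n).map h := by
  rw [pyRange_len]
  simp only [List.map_map]
  refine List.map_congr_left (fun k hk => ?_)
  exact hg k (List.mem_range.mp hk)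

-- A's outer loop: setting the flag on a hit is List.any (with seed `b`)
theorem foldl_or_any (l : List Int) (p : Int → Bool) (b : Bool) :
    l.foldl (fun acc x => if p x then true else acc) b = (b || l.any p) := by
  induction l generalizing b with
  | nil => simp
  | cons x t ih => rw [List.foldl_cons, ih]; by_cases hp : p x <;> simp [hp]

-- B's invariant: folding the rows over a column-sum table computes, per column,
-- the fold of that column's entries
theorem colsum_inv (rows : List (List Int)) (n : Nat) (f : Nat → Int) :
    rows.foldl
      (fun cs row =>
        (PySem.List.pyRange 0 (n : Int) 1).map
          (fun c => PySem.List.pyGetD cs c 0 + PySem.List.pyGetD row c 0))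
      ((List.range n).map f)
    = (List.range n).map
        (fun (k : Nat) => rows.foldl (fun s row => s + PySem.List.pyGetD row (k : Int) 0) (f k)) := by
  induction rows generalizing f with
  | nil => rfl
  | cons row rest ih =>
    rw [List.foldl_cons]
    have hstep :
        (PySem.List.pyRange 0 (n : Int) 1).map
          (fun c => PySem.List.pyGetD ((List.range n).map f) c 0 + PySem.List.pyGetD row c 0)
        = (List.range n).map (fun k => f k + PySem.List.pyGetD row (k : Int) 0) :=
      map_pyRange_cong n _ _ (fun k hk => by
        simp [PySem.List.pyGetD_natCast, List.getD, hk])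
    rw [hstep, ih (fun k => f k + PySem.List.pyGetD row (k : Int) 0)]
    simp [List.foldl_cons]

theorem check_grid_col_eq_alt (grid : List (List Int)) :
    check_grid_col grid = check_grid_col_alt grid := by
  cases grid with
  | nil => rfl
  | cons r0 rest =>
    unfold check_grid_col check_grid_col_alt
    rw [PySem.List.pyGet?_zero_cons]
    simp only [PySem.List.len_eq, Int.toNat_natCast]
    have hrep : List.replicate r0.length (0 : Int) = (List.range r0.length).map (fun _ => 0) := by
      simp
    rw [hrep, colsum_inv (r0 :: rest) r0.length (fun _ => 0)]
    have hif :
        (fun (bingo : Bool) (ci : Int) =>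
          if (r0 :: rest).foldl (fun s row => s + PySem.List.pyGetD row ci 0) 0 = -5 then true
          else bingo)
        = (fun (bingo : Bool) (ci : Int) =>
          if (fun c => decide ((r0 :: rest).foldl (fun s row => s + PySem.List.pyGetD row c 0) 0 = -5)) ci
          then true else bingo) := by
      funext bingo ci; simp
    rw [hif, foldl_or_any, pyRange_len, List.any_map, List.any_map, Bool.false_or]
    congr 1

-- ===== VERDICT (by name: the statement is the Claim_ definition above) =====
theorem check_grid_col_spec : Claim_equal_check_grid_col := by
  intro grid _ _
  unfold Spec_check_grid_col
  exact check_grid_col_eq_alt grid
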